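-- pv_equiv track=rewrite | github.com/NaegleLab/DANSy_Applications | entropyCalc.py | get_ngram_instance_count
-- ===== SOURCE A (Python) =====
-- def get_ngram_instance_count(ngram, corpus_list, delim):
--     """
--     Count the number of instances an n-gram occurs. Instance in this case refers to the actual times the n-gram occurs even within larger structures not just the number of structures it occurs in.
--
--     Inputs:
--         - ngram: str of the n-gram of interest
--         - corpus_list: list containing the corpus to be analyzed for the ngram
--         - delim: str of the delimiter separating individual tokens
--
--     Outputs:
--         - ngram_count: int of the number of instances
--     """
--
--     arch_length = len(ngram.split(delim))
--     ngram_count = 0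
--     for raw_arch in corpus_list:
--         if ngram in raw_arch:
--             split_arch = raw_arch.split(delim)
--             tot_ngrams = len(split_arch)-arch_length+1
--             for x in range(0, tot_ngrams):
--                 sub_check = delim.join(split_arch[x:x+arch_length])
--                 if ngram == sub_check:
--                     ngram_count += 1
--
--     return ngram_count
-- ===== SOURCE B (Python) =====
-- def get_ngram_instance_count(ngram, corpus_list, delim):
--     # KMP-style matching automaton: scan each token stream left to right once,
--     # maintaining s = length of the longest prefix of the pattern token list
--     # that is a suffix of the tokens read so far; a match is recorded each time
--     # s reaches the full pattern length.  No window slicing, no per-window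
--     # joins, no substring pre-filter.
--     pat = ngram.split(delim)
--     k = len(pat)
--     total = 0
--     for arch in corpus_list:
--         s = 0
--         for tok in arch.split(delim):
--             p = min(s + 1, k)
--             while p > 0 and not (pat[p - 1] == tok and pat[:p - 1] == pat[s - p + 1:s]):
--                 p -= 1
--             s = p
--             if s == k:
--                 total += 1
--     return total
-- ===== Notes on version B (the rewrite author's own statement) =====
-- stated objective: alternative
-- what changed: B counts matches with a KMP-style string-matching automaton over the token stream: one left-to-right pass per corpus entry maintaining the length of the longest pattern prefix that is a suffix of the tokens read so far, instead of A's slide-a-window loop that joins every window with the delimiter and compares it to the n-gram behind a substring pre-filter.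
-- outside the precondition, e.g. on get_ngram_instance_count('ab', ['ab'], ''): A raises ValueError, B raises ValueError
import Mathlib
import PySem

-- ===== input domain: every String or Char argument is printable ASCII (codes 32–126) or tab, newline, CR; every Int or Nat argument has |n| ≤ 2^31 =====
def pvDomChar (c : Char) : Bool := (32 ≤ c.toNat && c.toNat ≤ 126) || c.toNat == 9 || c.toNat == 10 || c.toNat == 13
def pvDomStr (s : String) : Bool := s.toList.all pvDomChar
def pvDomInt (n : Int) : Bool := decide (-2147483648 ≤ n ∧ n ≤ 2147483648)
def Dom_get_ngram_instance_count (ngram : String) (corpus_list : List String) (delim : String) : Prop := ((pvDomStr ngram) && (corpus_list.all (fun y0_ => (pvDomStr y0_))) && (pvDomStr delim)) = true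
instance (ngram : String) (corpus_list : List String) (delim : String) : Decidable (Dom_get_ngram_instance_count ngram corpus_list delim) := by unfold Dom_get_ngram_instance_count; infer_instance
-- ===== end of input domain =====

-- B replaces A's slide-a-window loop (per-window delim.join + string compare,
-- behind a substring pre-filter) by a KMP-style matching automaton: one
-- left-to-right pass over each token stream maintaining the length of the
-- longest pattern prefix that is a suffix of the tokens read so far;
-- equivalence is proved for every non-empty delimiter.

-- ===== PORT A =====
def get_ngram_instance_count (ngram : String) (corpus_list : List String) (delim : String) : Int :=
  -- arch_length = len(ngram.split(delim))
  let arch_length : Nat := (PySem.Chars.splitOn ngram.toList delim.toList).length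
  corpus_list.foldl (fun ngram_count raw_arch =>
    if PySem.Chars.isIn ngram.toList raw_arch.toList then      -- if ngram in raw_arch
      let split_arch := PySem.Chars.splitOn raw_arch.toList delim.toList
      let tot_ngrams : Int := (split_arch.length : Int) - (arch_length : Int) + 1
      (PySem.List.pyRange 0 tot_ngrams 1).foldl (fun c x =>
        -- sub_check = delim.join(split_arch[x:x+arch_length])
        let sub_check := PySem.Chars.join delim.toList
          (PySem.List.slice split_arch (some x) (some (x + (arch_length : Int))))
        if ngram.toList == sub_check then c + 1 else c) ngram_count
    else ngram_count) 0

-- ===== PORT B =====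
-- the `while p > 0 and not (pat[p-1] == tok and pat[:p-1] == pat[s-p+1:s])`
-- loop of Source B, descending from the initial candidate; for candidate p = q+1
-- the indices are all in range and nonnegative, so pat[q] is pat.getD q []
-- and the slice pat[s-q:s] is (pat.take s).drop (s - q)
def pvStepGo (pat : List (List Char)) (s : Nat) (tok : List Char) : Nat → Nat
  | 0 => 0
  | q + 1 =>
    if pat.getD q [] == tok && pat.take q == (pat.take s).drop (s - q) then q + 1
    else pvStepGo pat s tok q

def get_ngram_instance_count_alt (ngram : String) (corpus_list : List String) (delim : String) : Int :=
  let pat := PySem.Chars.splitOn ngram.toList delim.toList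
  let k := pat.length
  corpus_list.foldl (fun total arch =>
    let toks := PySem.Chars.splitOn arch.toList delim.toList
    (toks.foldl (fun st tok =>
        let s := pvStepGo pat st.1 tok (min (st.1 + 1) k)
        (s, if s = k then st.2 + 1 else st.2)) ((0 : Nat), total)).2) 0

-- ===== PRECONDITION & SPEC =====
-- Python's str.split raises ValueError on an empty separator, so A (and B)
-- raise whenever delim = "": exactly those inputs are excluded.
def Pre_get_ngram_instance_count (ngram : String) (corpus_list : List String) (delim : String) : Prop := delim ≠ ""
instance (ngram : String) (corpus_list : List String) (delim : String) : Decidable (Pre_get_ngram_instance_count ngram corpus_list delim) := by unfold Pre_get_ngram_instance_count; infer_instance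

def pvWitness_get_ngram_instance_count : String × List String × String := ("a b", ["a b c", "x a b"], " ")

def Spec_get_ngram_instance_count (ngram : String) (corpus_list : List String) (delim : String) (out : Int) : Prop := out = get_ngram_instance_count_alt ngram corpus_list delim
instance (ngram : String) (corpus_list : List String) (delim : String) (out : Int) : Decidable (Spec_get_ngram_instance_count ngram corpus_list delim out) := by unfold Spec_get_ngram_instance_count; infer_instance

-- ===== CLAIM (what is proved, stated in full; the proofs are below) =====
def Claim_equal_get_ngram_instance_count : Prop := ∀ (ngram : String) (corpus_list : List String) (delim : String), Dom_get_ngram_instance_count ngram corpus_list delim → Pre_get_ngram_instance_count ngram corpus_list delim → Spec_get_ngram_instance_count ngram corpus_list delim (get_ngram_instance_count ngram corpus_list delim)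

-- ===== LEMMAS AND PROOFS =====

-- -------- A-side: reduce A's per-entry loop to a window count --------

-- naive window count, reference form of A's inner loop
def pvCountFrom (pat : List (List Char)) (k : Nat) (toks : List (List Char)) (n i : Nat) : Int :=
  if i + k ≤ n then
    (if (toks.drop i).take k == pat then (1 : Int) else 0) + pvCountFrom pat k toks n (i + 1)
  else 0
termination_by n + 1 - i
decreasing_by omega

-- A reference recursion computing Python's str.split(sep) for sep ≠ [] (the
-- `rest.drop (d.length - 1)` is `(c :: rest).drop d.length` phrased to
-- terminate for every d).
def pvSplit (d : List Char) : List Char → List (List Char)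
  | [] => [[]]
  | c :: rest =>
    if d.isPrefixOf (c :: rest) then [] :: pvSplit d (rest.drop (d.length - 1))
    else
      match pvSplit d rest with
      | [] => [[]]
      | t :: ts => (c :: t) :: ts
termination_by l => l.length
decreasing_by
  · simp only [List.length_cons]
    have : (rest.drop (d.length - 1)).length ≤ rest.length := by
      simp [List.length_drop]
    omega
  · simp

theorem pvSplit_ne_nil (d cs : List Char) : pvSplit d cs ≠ [] := by
  cases cs with
  | nil => simp [pvSplit]
  | cons c rest =>
    rw [pvSplit]
    split
    · simp
    · split <;> simp

theorem pvSplit_go_eq (d : List Char) (hd : d ≠ []) :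
    ∀ (fuel : Nat) (cs cur : List Char) (acc : List (List Char)), cs.length < fuel →
      PySem.Chars.splitOn.go d fuel cs cur acc
        = acc.reverse ++ (pvSplit d cs).modifyHead (cur.reverse ++ ·) := by
  intro fuel
  induction fuel using Nat.strong_induction_on with
  | _ fuel IH =>
    intro cs cur acc hlen
    match fuel, cs with
    | fuel + 1, [] =>
      simp [PySem.Chars.splitOn.go, pvSplit]
    | fuel + 1, c :: rest =>
      rw [PySem.Chars.splitOn.go]
      by_cases hp : d.isPrefixOf (c :: rest)
      · rw [if_pos hp]
        have hdrop : (c :: rest).drop d.length = rest.drop (d.length - 1) := by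
          cases d with
          | nil => exact absurd rfl hd
          | cons a as => simp
        have hlt : ((c :: rest).drop d.length).length < fuel := by
          have : d.length ≥ 1 := by cases d; exact absurd rfl hd; simp
          simp only [List.length_drop, List.length_cons] at *
          omega
        rw [IH fuel (by omega) _ _ _ (by rw [hdrop] at hlt; simpa [hdrop] using hlt)]
        rw [pvSplit, if_pos hp, hdrop]
        rcases h : pvSplit d (rest.drop (d.length - 1)) with _ | ⟨t, ts⟩
        · exact absurd h (pvSplit_ne_nil d _)
        · simp
      · rw [if_neg hp]
        rw [IH fuel (by omega) _ _ _ (by simp at hlen ⊢; omega)]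
        rw [pvSplit, if_neg hp]
        rcases h : pvSplit d rest with _ | ⟨t, ts⟩
        · exact absurd h (pvSplit_ne_nil d _)
        · simp

theorem splitOn_eq_pvSplit (d cs : List Char) (hd : d ≠ []) :
    PySem.Chars.splitOn cs d = pvSplit d cs := by
  unfold PySem.Chars.splitOn
  rw [pvSplit_go_eq d hd (cs.length + 1) cs [] [] (by omega)]
  rcases h : pvSplit d cs with _ | ⟨t, ts⟩
  · exact absurd h (pvSplit_ne_nil d cs)
  · simp

theorem join_head_cons (d t : List Char) (c : Char) (ts : List (List Char)) :
    PySem.Chars.join d ((c :: t) :: ts) = c :: PySem.Chars.join d (t :: ts) := by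
  cases ts with
  | nil => simp [PySem.Chars.join_singleton]
  | cons q rest => rw [PySem.Chars.join_cons_cons, PySem.Chars.join_cons_cons]; simp

theorem prefix_eq_append_drop {d l : List Char} (h : d <+: l) : l = d ++ l.drop d.length := by
  obtain ⟨u, hu⟩ := h
  subst hu
  simp

theorem join_pvSplit (d cs : List Char) (hd : d ≠ []) :
    PySem.Chars.join d (pvSplit d cs) = cs := by
  fun_induction pvSplit d cs with
  | case1 => simp [PySem.Chars.join_singleton]
  | case2 c rest hp ih =>
    rcases h : pvSplit d (List.drop (d.length - 1) rest) with _ | ⟨t, ts⟩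
    · exact absurd h (pvSplit_ne_nil d _)
    · rw [h] at ih
      rw [PySem.Chars.join_cons_cons, ih]
      have hp' : d <+: (c :: rest) := by simpa [List.isPrefixOf_iff_prefix] using hp
      have hdrop : (c :: rest).drop d.length = rest.drop (d.length - 1) := by
        cases d with
        | nil => exact absurd rfl hd
        | cons a as => simp
      conv_rhs => rw [prefix_eq_append_drop hp']
      rw [hdrop]
      simp
  | case3 =>
    rename_i hsp ih
    exact absurd hsp (pvSplit_ne_nil d _)
  | case4 c rest hnp t ts hsp ih =>
    rw [join_head_cons]
    rw [hsp] at ih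
    rw [ih]

-- `d` first occurs in `t ++ d` only at the very end
def pvGood (d t : List Char) : Prop := ∀ i, i < t.length → ¬ d <+: (t.drop i ++ d)

theorem join_append (d : List Char) (as bs : List (List Char)) (ha : as ≠ []) (hb : bs ≠ []) :
    PySem.Chars.join d (as ++ bs) = PySem.Chars.join d as ++ d ++ PySem.Chars.join d bs := by
  induction as with
  | nil => exact absurd rfl ha
  | cons a as' IH =>
    cases as' with
    | nil =>
      cases bs with
      | nil => exact absurd rfl hb
      | cons b bs' =>
        simp [PySem.Chars.join_singleton, PySem.Chars.join_cons_cons]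
    | cons a2 as2 =>
      have h1 : ((a :: a2 :: as2) ++ bs) = a :: ((a2 :: as2) ++ bs) := rfl
      have h2 : (a2 :: as2) ++ bs = a2 :: (as2 ++ bs) := rfl
      rw [h1, h2, PySem.Chars.join_cons_cons, ← h2, IH (by simp), PySem.Chars.join_cons_cons]
      simp [List.append_assoc]

theorem prefix_of_prefix_append {d v w : List Char} (h : d <+: v ++ w) (hle : d.length ≤ v.length) :
    d <+: v := by
  rw [List.prefix_iff_eq_take] at h ⊢
  rwa [List.take_append_of_le_length hle] at h

theorem infix_iff_exists_drop {d t : List Char} : d <:+: t ↔ ∃ i, d <+: t.drop i := by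
  constructor
  · rintro ⟨u, v, rfl⟩
    exact ⟨u.length, by simp⟩
  · rintro ⟨i, w, hw⟩
    exact ⟨t.take i, w, by rw [List.append_assoc, hw, List.take_append_drop]⟩

theorem join_cons_ne_nil (d t : List Char) (ts : List (List Char)) (h : ts ≠ []) :
    PySem.Chars.join d (t :: ts) = t ++ d ++ PySem.Chars.join d ts := by
  cases ts with
  | nil => exact absurd rfl h
  | cons q rest => rw [PySem.Chars.join_cons_cons]

theorem not_infix_nil_of_ne {d : List Char} (hd : d ≠ []) : ¬ d <:+: ([] : List Char) := by
  intro h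
  exact hd (List.eq_nil_of_infix_nil h)

theorem pvSplit_pieces (d cs : List Char) (hd : d ≠ []) :
    (∀ t ∈ (pvSplit d cs).dropLast, pvGood d t) ∧ (∀ t ∈ pvSplit d cs, ¬ d <:+: t) := by
  fun_induction pvSplit d cs with
  | case1 =>
    refine ⟨by simp, ?_⟩
    intro t ht
    simp at ht
    subst ht
    exact not_infix_nil_of_ne hd
  | case2 c rest hp ih =>
    rcases hS : pvSplit d (List.drop (d.length - 1) rest) with _ | ⟨s, S⟩
    · exact absurd hS (pvSplit_ne_nil d _)
    · rw [hS] at ih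
      constructor
      · intro t ht
        rw [List.dropLast_cons_of_ne_nil (by simp)] at ht
        rcases List.mem_cons.mp ht with h1 | h1
        · subst h1; intro i hi; simp at hi
        · exact ih.1 t h1
      · intro t ht
        rcases List.mem_cons.mp ht with h1 | h1
        · subst h1; exact not_infix_nil_of_ne hd
        · exact ih.2 t h1
  | case3 =>
    rename_i hsp ih
    exact absurd hsp (pvSplit_ne_nil d _)
  | case4 c rest hnp t ts hsp ih =>
    rw [hsp] at ih
    have hrest : rest = PySem.Chars.join d (t :: ts) := by
      rw [← hsp, join_pvSplit d rest hd]
    have hnp' : ¬ d <+: (c :: rest) := fun h => hnp (List.isPrefixOf_iff_prefix.mpr h)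
    have hctpre : (c :: t) ++ d <+: (c :: rest) ∨ (ts = [] ∧ rest = t) := by
      cases hts : ts with
      | nil =>
        right
        refine ⟨rfl, ?_⟩
        rw [hrest, hts, PySem.Chars.join_singleton]
      | cons q rest' =>
        left
        rw [hrest, join_cons_ne_nil d t ts (by rw [hts]; simp)]
        exact ⟨PySem.Chars.join d ts, by simp⟩
    constructor
    · intro y hy
      cases hts : ts with
      | nil => rw [hts] at hy; simp at hy
      | cons q rest' =>
        have hts' : ts ≠ [] := by rw [hts]; simp
        rw [List.dropLast_cons_of_ne_nil hts'] at hy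
        rcases List.mem_cons.mp hy with h1 | h1
        · subst h1
          have hgt : pvGood d t := ih.1 t (by rw [List.dropLast_cons_of_ne_nil hts']; simp)
          intro i hi
          rcases Nat.eq_zero_or_pos i with h0 | h0
          · subst h0
            intro hpre
            simp only [List.drop_zero] at hpre
            rcases hctpre with hc | ⟨hc, _⟩
            · exact hnp' (hpre.trans hc)
            · rw [hc] at hts; simp at hts
          · intro hpre
            have heq : (c :: t).drop i ++ d = t.drop (i - 1) ++ d := by
              cases i with
              | zero => omega
              | succ j => simp
            rw [heq] at hpre
            exact hgt (i - 1) (by simp at hi; omega) hpre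
        · exact ih.1 y (by rw [List.dropLast_cons_of_ne_nil hts']; simp [h1])
    · intro y hy
      rcases List.mem_cons.mp hy with h1 | h1
      · subst h1
        intro hin
        rw [infix_iff_exists_drop] at hin
        obtain ⟨i, hpre⟩ := hin
        rcases Nat.eq_zero_or_pos i with h0 | h0
        · subst h0
          simp at hpre
          rcases hctpre with hc | ⟨_, hc⟩
          · exact hnp' (hpre.trans ((List.prefix_append (c :: t) d).trans hc))
          · exact hnp' (by rw [hc]; exact hpre)
        · have heq : (c :: t).drop i = t.drop (i - 1) := by
            cases i with
            | zero => omega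
            | succ j => simp
          rw [heq] at hpre
          exact ih.2 t (by simp) (infix_iff_exists_drop.mpr ⟨i - 1, hpre⟩)
      · exact ih.2 y (by simp [h1])

theorem pvSplit_of_not_infix (d t : List Char) (_hd : d ≠ []) (h : ¬ d <:+: t) :
    pvSplit d t = [t] := by
  induction t with
  | nil => simp [pvSplit]
  | cons c rest IH =>
    have hnp : ¬ d.isPrefixOf (c :: rest) = true := by
      intro hp
      exact h ((List.isPrefixOf_iff_prefix.mp hp).isInfix)
    have hrest : ¬ d <:+: rest := fun hin => h (List.infix_cons hin)
    rw [pvSplit, if_neg hnp, IH hrest]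

theorem pvSplit_append_of_good (d t : List Char) (hd : d ≠ []) (hg : pvGood d t) (u : List Char) :
    pvSplit d (t ++ d ++ u) = t :: pvSplit d u := by
  induction t with
  | nil =>
    cases d with
    | nil => exact absurd rfl hd
    | cons a as =>
      have h1 : ([] : List Char) ++ (a :: as) ++ u = a :: (as ++ u) := by simp
      rw [h1, pvSplit]
      have hp : (a :: as).isPrefixOf (a :: (as ++ u)) = true := by
        rw [List.isPrefixOf_iff_prefix]
        exact ⟨u, by simp⟩
      rw [if_pos hp]
      simp
  | cons c t' IH =>
    have h1 : (c :: t') ++ d ++ u = c :: (t' ++ d ++ u) := by simp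
    rw [h1, pvSplit]
    have hnp : ¬ d.isPrefixOf (c :: (t' ++ d ++ u)) = true := by
      intro hp
      have hp' : d <+: (c :: (t' ++ d ++ u)) := List.isPrefixOf_iff_prefix.mp hp
      have h2 : c :: (t' ++ d ++ u) = (c :: t' ++ d) ++ u := by simp
      rw [h2] at hp'
      have := prefix_of_prefix_append hp' (by simp; omega)
      exact hg 0 (by simp) (by simpa using this)
    rw [if_neg hnp]
    have hg' : pvGood d t' := by
      intro i hi
      have := hg (i + 1) (by simp; omega)
      simpa using this
    rw [IH hg']

theorem pvSplit_join_eq (d : List Char) (hd : d ≠ []) (ts : List (List Char)) (hne : ts ≠ [])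
    (hg : ∀ t ∈ ts.dropLast, pvGood d t) (hf : ∀ t ∈ ts, ¬ d <:+: t) :
    pvSplit d (PySem.Chars.join d ts) = ts := by
  induction ts with
  | nil => exact absurd rfl hne
  | cons t ts' IH =>
    cases hts' : ts' with
    | nil =>
      rw [PySem.Chars.join_singleton]
      exact pvSplit_of_not_infix d t hd (hf t (by simp))
    | cons q rest =>
      rw [← hts']
      have hne' : ts' ≠ [] := by rw [hts']; simp
      rw [join_cons_ne_nil d t ts' hne', pvSplit_append_of_good d t hd
        (hg t (by rw [List.dropLast_cons_of_ne_nil hne']; simp)) _]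
      rw [IH hne' (fun x hx => hg x (by rw [List.dropLast_cons_of_ne_nil hne']; simp [hx]))
        (fun x hx => hf x (by simp [hx]))]

theorem window_length (ts : List (List Char)) (j k : Nat) (hjk : j + k ≤ ts.length) :
    ((ts.drop j).take k).length = k := by
  simp [List.length_take, List.length_drop]
  omega

theorem window_ne_nil (ts : List (List Char)) (j k : Nat) (hk : 1 ≤ k) (hjk : j + k ≤ ts.length) :
    (ts.drop j).take k ≠ [] := by
  intro h
  have := window_length ts j k hjk
  rw [h] at this
  simp at this
  omega

theorem window_dropLast_subset (ts : List (List Char)) (j k : Nat) (hjk : j + k ≤ ts.length) :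
    ∀ x ∈ ((ts.drop j).take k).dropLast, x ∈ ts.dropLast := by
  intro x hx
  obtain ⟨i, hi, hget⟩ := List.mem_iff_getElem.mp hx
  have hlenw : ((ts.drop j).take k).length = k := window_length ts j k hjk
  have hi' : i < k - 1 := by
    simpa [List.length_dropLast, hlenw] using hi
  have hidx : j + i < ts.dropLast.length := by
    simp [List.length_dropLast]
    omega
  refine List.mem_iff_getElem.mpr ⟨j + i, hidx, ?_⟩
  rw [List.getElem_dropLast] at hget ⊢
  rw [List.getElem_take, List.getElem_drop] at hget
  exact hget

theorem window_canonical (d cs : List Char) (hd : d ≠ []) (j k : Nat) (hk : 1 ≤ k)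
    (hjk : j + k ≤ (pvSplit d cs).length) :
    pvSplit d (PySem.Chars.join d (((pvSplit d cs).drop j).take k))
      = ((pvSplit d cs).drop j).take k := by
  refine pvSplit_join_eq d hd _ (window_ne_nil _ j k hk hjk) ?_ ?_
  · intro t ht
    exact (pvSplit_pieces d cs hd).1 t (window_dropLast_subset _ j k hjk t ht)
  · intro t ht
    exact (pvSplit_pieces d cs hd).2 t
      (List.mem_of_mem_drop (List.mem_of_mem_take ht))

theorem join_window_infix (d : List Char) (ts : List (List Char)) (j k : Nat)
    (hk : 1 ≤ k) (hjk : j + k ≤ ts.length) :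
    PySem.Chars.join d ((ts.drop j).take k) <:+: PySem.Chars.join d ts := by
  have hw : (ts.drop j).take k ≠ [] := window_ne_nil ts j k hk hjk
  have hsplit : ts = ts.take j ++ ((ts.drop j).take k ++ (ts.drop j).drop k) := by
    rw [List.take_append_drop, List.take_append_drop]
  have hmid : (ts.drop j).take k ++ (ts.drop j).drop k ≠ [] := by
    intro hc
    rcases List.append_eq_nil_iff.mp hc with ⟨h1, _⟩
    exact hw h1
  by_cases hpre : ts.take j = []
  · by_cases hpost : (ts.drop j).drop k = []
    · conv_rhs => rw [hsplit, hpre, hpost]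
      simp
    · conv_rhs => rw [hsplit, hpre]
      rw [List.nil_append, join_append d _ _ hw hpost]
      exact ⟨[], d ++ PySem.Chars.join d ((ts.drop j).drop k), by simp⟩
  · by_cases hpost : (ts.drop j).drop k = []
    · conv_rhs => rw [hsplit, hpost]
      rw [List.append_nil, join_append d _ _ hpre hw]
      exact ⟨PySem.Chars.join d (ts.take j) ++ d, [], by simp⟩
    · conv_rhs => rw [hsplit]
      rw [join_append d _ _ hpre hmid, join_append d _ _ hw hpost]
      exact ⟨PySem.Chars.join d (ts.take j) ++ d, d ++ PySem.Chars.join d ((ts.drop j).drop k),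
        by simp⟩

-- windows of a split are canonical: join is injective there
theorem window_join_eq_iff (d cs ngramL : List Char) (hd : d ≠ [])
    (j : Nat) (hjk : j + (pvSplit d ngramL).length ≤ (pvSplit d cs).length) :
    (PySem.Chars.join d (((pvSplit d cs).drop j).take (pvSplit d ngramL).length) = ngramL
      ↔ ((pvSplit d cs).drop j).take (pvSplit d ngramL).length = pvSplit d ngramL) := by
  have hk : 1 ≤ (pvSplit d ngramL).length :=
    List.length_pos_of_ne_nil (pvSplit_ne_nil d ngramL)
  constructor
  · intro h
    have := window_canonical d cs hd j (pvSplit d ngramL).length hk hjk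
    rw [h] at this
    exact this.symm
  · intro h
    rw [h, join_pvSplit d ngramL hd]

theorem window_match_infix (d cs ngramL : List Char) (hd : d ≠ [])
    (j : Nat) (hjk : j + (pvSplit d ngramL).length ≤ (pvSplit d cs).length)
    (h : ((pvSplit d cs).drop j).take (pvSplit d ngramL).length = pvSplit d ngramL) :
    ngramL <:+: cs := by
  have hk : 1 ≤ (pvSplit d ngramL).length :=
    List.length_pos_of_ne_nil (pvSplit_ne_nil d ngramL)
  have hinf := join_window_infix d (pvSplit d cs) j (pvSplit d ngramL).length hk hjk
  rw [h, join_pvSplit d ngramL hd, join_pvSplit d cs hd] at hinf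
  exact hinf

theorem pvCountFrom_eq_countP (pat : List (List Char)) (k : Nat)
    (toks : List (List Char)) (n : Nat) (i : Nat) :
    pvCountFrom pat k toks n i
      = ((List.range' i (n + 1 - k - i)).countP (fun j => (toks.drop j).take k == pat) : Int) := by
  fun_induction pvCountFrom pat k toks n i with
  | case1 i h ih =>
    rw [show n + 1 - k - i = (n + 1 - k - (i + 1)) + 1 from by omega, List.range'_succ,
      List.countP_cons, ih]
    by_cases hp : ((toks.drop i).take k == pat) = true
    · rw [if_pos hp]
      simp [hp]
      ring
    · rw [if_neg hp]
      simp [hp]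
  | case2 i h =>
    rw [show n + 1 - k - i = 0 from by omega]
    simp

-- the per-element (per raw_arch) equality of A's loop body with the window count
theorem arch_step_eq (ngramL d cs : List Char) (hd : d ≠ []) (cnt : Int) :
    (if PySem.Chars.isIn ngramL cs then
      (PySem.List.pyRange 0 (((PySem.Chars.splitOn cs d).length : Int) - ((PySem.Chars.splitOn ngramL d).length : Int) + 1) 1).foldl (fun c x =>
        if ngramL == PySem.Chars.join d
            (PySem.List.slice (PySem.Chars.splitOn cs d) (some x) (some (x + ((PySem.Chars.splitOn ngramL d).length : Int)))) then c + 1 else c) cnt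
    else cnt)
    = cnt + pvCountFrom (PySem.Chars.splitOn ngramL d) (PySem.Chars.splitOn ngramL d).length
        (PySem.Chars.splitOn cs d) (PySem.Chars.splitOn cs d).length 0 := by
  rw [splitOn_eq_pvSplit d cs hd, splitOn_eq_pvSplit d ngramL hd]
  have hk1 : 1 ≤ (pvSplit d ngramL).length :=
    List.length_pos_of_ne_nil (pvSplit_ne_nil d ngramL)
  rw [pvCountFrom_eq_countP]
  simp only [Nat.sub_zero]
  rw [← List.range_eq_range']
  by_cases hin : PySem.Chars.isIn ngramL cs = true
  · rw [if_pos hin]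
    rw [PySem.List.foldl_if_add_one
      (p := fun x => ngramL == PySem.Chars.join d
        (PySem.List.slice (pvSplit d cs) (some x) (some (x + ((pvSplit d ngramL).length : Int)))))]
    congr 1
    by_cases hkn : (pvSplit d ngramL).length ≤ (pvSplit d cs).length + 1
    · have htot : (((pvSplit d cs).length : Int) - ((pvSplit d ngramL).length : Int) + 1)
          = (((pvSplit d cs).length + 1 - (pvSplit d ngramL).length : Nat) : Int) := by
        omega
      rw [htot, PySem.List.pyRange_zero_natCast, List.countP_map]
      congr 1
      apply List.countP_congr
      intro j hj
      have hjk : j + (pvSplit d ngramL).length ≤ (pvSplit d cs).length := by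
        rw [List.mem_range] at hj
        omega
      simp only [Function.comp_apply]
      have hc1 : ((j : Int) + ((pvSplit d ngramL).length : Int))
          = ((j + (pvSplit d ngramL).length : Nat) : Int) := by push_cast; ring
      rw [hc1, PySem.List.slice_natCast,
        show j + (pvSplit d ngramL).length - j = (pvSplit d ngramL).length from by omega]
      simp only [beq_iff_eq]
      exact Iff.trans eq_comm (window_join_eq_iff d cs ngramL hd j hjk)
    · have hm : (pvSplit d cs).length + 1 - (pvSplit d ngramL).length = 0 := by omega
      rw [hm]
      have hneg : ¬ ((0 : Int) < ((pvSplit d cs).length : Int) - ((pvSplit d ngramL).length : Int) + 1) := by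
        omega
      simp [PySem.List.pyRange, hneg]
  · rw [if_neg hin]
    have h0 : (List.range ((pvSplit d cs).length + 1 - (pvSplit d ngramL).length)).countP
        (fun j => ((pvSplit d cs).drop j).take (pvSplit d ngramL).length == pvSplit d ngramL) = 0 := by
      rw [List.countP_eq_zero]
      intro j hj hpj
      have hjk : j + (pvSplit d ngramL).length ≤ (pvSplit d cs).length := by
        rw [List.mem_range] at hj
        omega
      have hw : ((pvSplit d cs).drop j).take (pvSplit d ngramL).length = pvSplit d ngramL := by
        simpa using hpj
      have hinf := window_match_infix d cs ngramL hd j hjk hw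
      rw [← PySem.Chars.isIn_iff_infix] at hinf
      exact hin hinf
    rw [h0]
    simp

-- -------- B-side: the automaton pass computes the same window count --------

-- the automaton invariant: length of the longest prefix of `pat` (capped at k)
-- that is a suffix of the processed tokens `t`
def pvL (pat : List (List Char)) (k : Nat) (t : List (List Char)) : Nat :=
  Nat.findGreatest (fun p => (pat.take p).isSuffixOf t) k

theorem pvL_suffix (pat : List (List Char)) (k : Nat) (t : List (List Char)) :
    (pat.take (pvL pat k t)) <:+ t := by
  have h : (pat.take (pvL pat k t)).isSuffixOf t = true :=
    Nat.findGreatest_spec (P := fun p => (pat.take p).isSuffixOf t) (Nat.zero_le k) (by simp)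
  exact List.isSuffixOf_iff_suffix.mp h

theorem le_pvL {pat : List (List Char)} {k p : Nat} {t : List (List Char)}
    (hp : p ≤ k) (h : (pat.take p) <:+ t) : p ≤ pvL pat k t :=
  Nat.le_findGreatest hp (by rwa [List.isSuffixOf_iff_suffix])

theorem pvL_le (pat : List (List Char)) (k : Nat) (t : List (List Char)) : pvL pat k t ≤ k :=
  Nat.findGreatest_le k

theorem pvL_nil (pat : List (List Char)) (k : Nat) (hpat : pat ≠ []) : pvL pat k [] = 0 := by
  have h := pvL_suffix pat k []
  have h2 : pat.take (pvL pat k []) = [] := List.suffix_nil.mp h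
  rcases List.take_eq_nil_iff.mp h2 with h3 | h3
  · exact h3
  · exact absurd h3 hpat

-- a <:+ t for suffixes is determined by the last element when both sides snoc
theorem suffix_snoc_iff {α : Type} (a t : List α) (x y : α) :
    (a ++ [x]) <:+ (t ++ [y]) ↔ x = y ∧ a <:+ t := by
  rw [← List.reverse_prefix, List.reverse_append, List.reverse_append]
  simp only [List.reverse_singleton, List.singleton_append]
  rw [List.cons_prefix_cons, List.reverse_prefix]

theorem take_succ_getD (pat : List (List Char)) (p : Nat) (hp : p < pat.length) :
    pat.take (p + 1) = pat.take p ++ [pat.getD p []] := by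
  rw [List.take_add_one, List.getElem?_eq_getElem hp]
  simp [List.getD, List.getElem?_eq_getElem hp]

-- suffixes of one list are totally ordered by length
theorem suffix_of_suffix_le {α : Type} {a b t : List α}
    (ha : a <:+ t) (hb : b <:+ t) (h : a.length ≤ b.length) : a <:+ b := by
  rw [← List.reverse_prefix]
  exact List.prefix_of_prefix_length_le
    (List.reverse_prefix.mpr ha) (List.reverse_prefix.mpr hb) (by simpa using h)

-- the loop condition at candidate q+1 tests exactly 'pat.take (q+1) is a
-- suffix of t ++ [tok]', given s = pvL pat k t
theorem cond_iff (pat : List (List Char)) (t : List (List Char)) (tok : List Char)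
    (q : Nat) (hq : q + 1 ≤ min (pvL pat pat.length t + 1) pat.length) :
    ((pat.getD q [] == tok && pat.take q == (pat.take (pvL pat pat.length t)).drop (pvL pat pat.length t - q)) = true)
      ↔ (pat.take (q + 1)) <:+ (t ++ [tok]) := by
  have hs := pvL_le pat pat.length t
  set s := pvL pat pat.length t with hsdef
  have hqs : q ≤ s := by omega
  have hqlen : q < pat.length := by omega
  have hlen_ts : (pat.take s).length = s := by simp [List.length_take]; omega
  have hlen_tq : (pat.take q).length = q := by simp [List.length_take]; omega
  rw [take_succ_getD pat q hqlen, suffix_snoc_iff]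
  have hmid : pat.take q <:+ t ↔ pat.take q <:+ pat.take s := by
    constructor
    · intro h
      exact suffix_of_suffix_le h (pvL_suffix pat pat.length t) (by omega)
    · intro h
      exact h.trans (pvL_suffix pat pat.length t)
  have hdropiff : pat.take q <:+ pat.take s ↔ pat.take q = (pat.take s).drop (s - q) := by
    rw [List.suffix_iff_eq_drop, hlen_ts, hlen_tq]
  constructor
  · intro h
    rcases Bool.and_eq_true_iff.mp h with ⟨h1, h2⟩
    refine ⟨beq_iff_eq.mp h1, ?_⟩
    exact hmid.mpr (hdropiff.mpr (beq_iff_eq.mp h2))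
  · rintro ⟨h1, h2⟩
    exact Bool.and_eq_true_iff.mpr ⟨beq_iff_eq.mpr h1, beq_iff_eq.mpr (hdropiff.mp (hmid.mp h2))⟩

-- the new state can exceed neither the old state + 1 nor k
theorem pvL_snoc_le (pat : List (List Char)) (t : List (List Char)) (tok : List Char) :
    pvL pat pat.length (t ++ [tok]) ≤ min (pvL pat pat.length t + 1) pat.length := by
  have hk := pvL_le pat pat.length (t ++ [tok])
  rcases h0 : pvL pat pat.length (t ++ [tok]) with _ | q
  · omega
  · have hsuf := pvL_suffix pat pat.length (t ++ [tok])
    rw [h0] at hsuf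
    have hqlen : q < pat.length := by omega
    rw [take_succ_getD pat q hqlen, suffix_snoc_iff] at hsuf
    have := le_pvL (pat := pat) (k := pat.length) (p := q) (by omega) hsuf.2
    omega

theorem pvStepGo_eq (pat : List (List Char)) (t : List (List Char)) (tok : List Char) :
    ∀ q, q ≤ min (pvL pat pat.length t + 1) pat.length →
      pvL pat pat.length (t ++ [tok]) ≤ q →
      pvStepGo pat (pvL pat pat.length t) tok q = pvL pat pat.length (t ++ [tok]) := by
  intro q
  induction q with
  | zero => intro _ h; simp [pvStepGo]; omega
  | succ p IH =>
    intro hq hub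
    rw [pvStepGo]
    by_cases hc : (pat.getD p [] == tok && pat.take p == (pat.take (pvL pat pat.length t)).drop (pvL pat pat.length t - p)) = true
    · rw [if_pos hc]
      have hsuf := (cond_iff pat t tok p hq).mp hc
      have := le_pvL (pat := pat) (k := pat.length) (p := p + 1) (by omega) hsuf
      omega
    · rw [if_neg hc]
      have hne : pvL pat pat.length (t ++ [tok]) ≠ p + 1 := by
        intro heq
        apply hc
        apply (cond_iff pat t tok p hq).mpr
        have := pvL_suffix pat pat.length (t ++ [tok])
        rwa [heq] at this
      exact IH (by omega) (by omega)

theorem pvStep_correct (pat : List (List Char)) (t : List (List Char)) (tok : List Char) :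
    pvStepGo pat (pvL pat pat.length t) tok (min (pvL pat pat.length t + 1) pat.length)
      = pvL pat pat.length (t ++ [tok]) :=
  pvStepGo_eq pat t tok _ (le_refl _) (pvL_snoc_le pat t tok)

theorem pvL_eq_iff (pat : List (List Char)) (t : List (List Char)) :
    pvL pat pat.length t = pat.length ↔ pat <:+ t := by
  constructor
  · intro h
    have := pvL_suffix pat pat.length t
    rwa [h, List.take_length] at this
  · intro h
    have := le_pvL (pat := pat) (k := pat.length) (p := pat.length) (t := t) (le_refl _)
      (by rwa [List.take_length])
    have h2 := pvL_le pat pat.length t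
    omega

-- the inner fold of B's port, tracked by the pvL invariant
theorem scan_eq (pat : List (List Char)) :
    ∀ (rest t : List (List Char)) (c : Int),
      rest.foldl (fun st tok =>
          let s := pvStepGo pat st.1 tok (min (st.1 + 1) pat.length)
          (s, if s = pat.length then st.2 + 1 else st.2)) (pvL pat pat.length t, c)
      = (pvL pat pat.length (t ++ rest),
         c + ((List.range rest.length).countP
              (fun i => pvL pat pat.length (t ++ rest.take (i + 1)) == pat.length) : Int)) := by
  intro rest
  induction rest with
  | nil => intro t c; simp
  | cons tok rest IH =>
    intro t c
    rw [List.foldl_cons]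
    simp only [pvStep_correct pat t tok]
    rw [IH (t ++ [tok])]
    have hassoc : t ++ [tok] ++ rest = t ++ (tok :: rest) := by simp
    rw [hassoc]
    congr 1
    rw [List.length_cons, List.range_succ_eq_map, List.countP_cons, List.countP_map]
    have h0 : (tok :: rest).take 1 = [tok] := rfl
    have hcnt : (List.countP
        ((fun i => pvL pat pat.length (t ++ (tok :: rest).take (i + 1)) == pat.length) ∘ Nat.succ)
        (List.range rest.length))
        = (List.countP (fun i => pvL pat pat.length (t ++ [tok] ++ rest.take (i + 1)) == pat.length)
          (List.range rest.length)) := by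
      apply List.countP_congr
      intro i _
      simp [Function.comp_apply, List.take_succ_cons, List.append_assoc]
    rw [hcnt, h0]
    by_cases hm : pvL pat pat.length (t ++ [tok]) = pat.length
    · simp [hm]
      ring
    · simp [hm]

-- a match ending at position i+1 is exactly a window match at j = i+1-k
theorem match_at_iff (pat toks : List (List Char)) (i : Nat) (hi : i < toks.length)
    (hk1 : 1 ≤ pat.length) :
    (pvL pat pat.length (toks.take (i + 1)) = pat.length)
      ↔ (pat.length ≤ i + 1 ∧ (toks.drop (i + 1 - pat.length)).take pat.length = pat) := by
  rw [pvL_eq_iff]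
  have hlen : (toks.take (i + 1)).length = i + 1 := by
    simp [List.length_take]; omega
  constructor
  · intro h
    have hle : pat.length ≤ i + 1 := by
      have := h.length_le
      omega
    refine ⟨hle, ?_⟩
    have := List.suffix_iff_eq_drop.mp h
    rw [hlen, List.drop_take] at this
    rw [show i + 1 - (i + 1 - pat.length) = pat.length from by omega] at this
    exact this.symm
  · rintro ⟨hle, hw⟩
    rw [List.suffix_iff_eq_drop, hlen, List.drop_take,
      show i + 1 - (i + 1 - pat.length) = pat.length from by omega]
    exact hw.symm

-- reindex the end-position count as A's window count
theorem count_reindex (pat toks : List (List Char)) (hk1 : 1 ≤ pat.length) :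
    ((List.range toks.length).countP
        (fun i => pvL pat pat.length (toks.take (i + 1)) == pat.length))
      = ((List.range (toks.length + 1 - pat.length)).countP
        (fun j => (toks.drop j).take pat.length == pat)) := by
  set k := pat.length with hk
  set n := toks.length with hn
  have hpt : ∀ i < n, ((fun i => pvL pat k (toks.take (i + 1)) == k) i = true)
      ↔ (k ≤ i + 1 ∧ (toks.drop (i + 1 - k)).take k = pat) := by
    intro i hi
    rw [beq_iff_eq]
    exact match_at_iff pat toks i hi hk1
  by_cases hcase : k ≤ n
  · have hsplitr : List.range n = List.range' 0 (k - 1) ++ List.range' (k - 1) (n - (k - 1)) := by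
      rw [List.range_eq_range']
      rw [show List.range' (k - 1) (n - (k - 1)) = List.range' (0 + 1 * (k - 1)) (n - (k - 1)) from by
        congr 1; omega]
      rw [List.range'_append]
      congr 1
      omega
    rw [hsplitr, List.countP_append]
    have hfirst : (List.range' 0 (k - 1)).countP
        (fun i => pvL pat k (toks.take (i + 1)) == k) = 0 := by
      rw [List.countP_eq_zero]
      intro i hi
      rw [List.mem_range' ] at hi
      obtain ⟨m, hm, rfl⟩ := hi
      intro hcontra
      have hin : 0 + 1 * m < n := by omega
      have := (hpt _ (by omega)).mp hcontra
      omega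
    rw [hfirst, Nat.zero_add]
    rw [List.range'_eq_map_range, List.countP_map]
    rw [show n - (k - 1) = n + 1 - k from by omega]
    apply List.countP_congr
    intro j hj
    rw [List.mem_range] at hj
    simp only [Function.comp_apply]
    rw [(hpt (k - 1 + j) (by omega)), beq_iff_eq]
    constructor
    · rintro ⟨_, hw⟩
      rwa [show k - 1 + j + 1 - k = j from by omega] at hw
    · intro hw
      refine ⟨by omega, ?_⟩
      rwa [show k - 1 + j + 1 - k = j from by omega]
  · have h1 : n + 1 - k = 0 := by omega
    rw [h1]
    simp only [List.range_zero, List.countP_nil]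
    rw [List.countP_eq_zero]
    intro i hi
    rw [List.mem_range] at hi
    intro hcontra
    have := (hpt i hi).mp hcontra
    omega

-- per-arch equality of B's inner fold with the window count
theorem alt_arch_eq (pat toks : List (List Char)) (hpat : pat ≠ []) (c : Int) :
    (toks.foldl (fun st tok =>
        let s := pvStepGo pat st.1 tok (min (st.1 + 1) pat.length)
        (s, if s = pat.length then st.2 + 1 else st.2)) ((0 : Nat), c)).2
      = c + ((List.range (toks.length + 1 - pat.length)).countP
          (fun j => (toks.drop j).take pat.length == pat) : Int) := by
  have h0 : (0 : Nat) = pvL pat pat.length [] := (pvL_nil pat pat.length hpat).symm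
  rw [h0, scan_eq pat toks [] c]
  simp only [List.nil_append]
  rw [count_reindex pat toks (List.length_pos_of_ne_nil hpat)]

-- ===== VERDICT (by name: the statement is the Claim_ definition above) =====
theorem get_ngram_instance_count_spec : Claim_equal_get_ngram_instance_count := by
  intro ngram corpus_list delim _ hpre
  unfold Spec_get_ngram_instance_count
  unfold get_ngram_instance_count get_ngram_instance_count_alt
  have hd : delim.toList ≠ [] := by
    simpa [String.toList_eq_nil_iff] using hpre
  refine (PySem.List.foldl_congr_mem corpus_list _ _ 0 ?_)
  intro acc arch _
  simp only []
  rw [arch_step_eq ngram.toList delim.toList arch.toList hd acc]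
  rw [pvCountFrom_eq_countP]
  have hpat : PySem.Chars.splitOn ngram.toList delim.toList ≠ [] := by
    rw [splitOn_eq_pvSplit _ _ hd]
    exact pvSplit_ne_nil _ _
  rw [alt_arch_eq _ _ hpat acc]
  simp only [Nat.sub_zero, ← List.range_eq_range']
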